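-- pv_equiv track=rewrite | github.com/yungKnight/d-encryptor | whisper.py | whisperer
-- ===== SOURCE A (Python) =====
-- def whisperer(message, drift):
--     alphabet = 'abcdefghijklmnopqrstuvwxyz'
--     non_alphabet_replacement = {',':'^', '.':';', '!':'&', '?':'%', '_':'_', '(':'#', ')':'"', ' ':'.', '\t':'..'}
--     encrypted_message = ''
--     drift = int(drift)
--     current_drift = drift
--     for character in message:
--         if character.lower() in alphabet:
--             character_index = alphabet.index(character.lower())
--             encrypted_character_index = (character_index + current_drift) % 26
--             encrypted_character = alphabet[encrypted_character_index] if character.islower() else alphabet[encrypted_character_index].upper()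
--             encrypted_message += encrypted_character
--             current_drift += 1
--         else:
--             encrypted_message += non_alphabet_replacement.get(character, character)
--             current_drift = drift
--     return encrypted_message
-- ===== SOURCE B (Python) =====
-- def whisperer(message, drift):
--     alphabet = 'abcdefghijklmnopqrstuvwxyz'
--     subs = {',': '^', '.': ';', '!': '&', '?': '%', '_': '_',
--             '(': '#', ')': '"', ' ': '.', '\t': '..'}
--     drift = int(drift)
--     n = len(message)
--     pieces = []
--     i = 0
--     while i < n:
--         is_letter = message[i].lower() in alphabet
--         j = i
--         while j < n and (message[j].lower() in alphabet) == is_letter: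
--             j += 1
--         run = message[i:j]
--         if is_letter:
--             pieces.append(''.join(
--                 (alphabet[(alphabet.index(ch.lower()) + drift + p) % 26]
--                  if ch.islower()
--                  else alphabet[(alphabet.index(ch.lower()) + drift + p) % 26].upper())
--                 for p, ch in enumerate(run)))
--         else:
--             pieces.append(''.join(subs.get(ch, ch) for ch in run))
--         i = j
--     return ''.join(pieces)
-- ===== Notes on version B (the rewrite author's own statement) =====
-- stated objective: alternative
-- what changed: Replaces A's single character loop carrying a running drift counter with a run decomposition: the message is split into maximal letter/non-letter runs, each letter run is encrypted positionally (shift = drift + position within the run), each non-letter run is mapped through the substitution table, and the pieces are joined.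
import Mathlib
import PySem

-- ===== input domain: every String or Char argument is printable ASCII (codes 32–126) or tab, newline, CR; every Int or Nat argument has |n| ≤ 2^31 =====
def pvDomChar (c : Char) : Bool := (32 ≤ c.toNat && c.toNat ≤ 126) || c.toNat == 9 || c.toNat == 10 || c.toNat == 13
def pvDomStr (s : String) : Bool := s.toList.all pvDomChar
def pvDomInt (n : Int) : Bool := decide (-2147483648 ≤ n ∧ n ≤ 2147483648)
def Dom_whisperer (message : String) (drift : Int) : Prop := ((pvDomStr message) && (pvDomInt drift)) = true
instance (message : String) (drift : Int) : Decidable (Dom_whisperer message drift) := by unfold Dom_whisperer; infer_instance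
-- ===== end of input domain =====

-- B replaces A's single running-state loop by an outer pass over maximal letter/non-letter
-- runs with a positional shift inside each letter run (objective: alternative decomposition).

-- ===== PORT A =====
-- the alphabet constant of A
def pvAlph : List Char := "abcdefghijklmnopqrstuvwxyz".toList

-- non_alphabet_replacement.get(character, character); '\t' maps to '..' (two chars), so List Char
def pvSubA (c : Char) : List Char :=
  if c = ',' then ['^'] else if c = '.' then [';'] else if c = '!' then ['&']
  else if c = '?' then ['%'] else if c = '_' then ['_'] else if c = '(' then ['#']
  else if c = ')' then ['"'] else if c = ' ' then ['.']
  else if c = '\t' then ['.', '.'] else [c]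

-- the letter branch's encrypted character (alphabet.index never fails here, so getD defaults are unreachable)
def pvEncA (cur : Int) (c : Char) : Char :=
  let idx : Int := (((PySem.List.index? pvAlph (PySem.Chars.lowerChar c)).getD 0 : Nat) : Int)
  let e : Char := PySem.List.pyGetD pvAlph (PySem.Int.mod (idx + cur) 26) 'a'
  if PySem.Chars.islower c then e else PySem.Chars.upperChar e

-- one iteration of A's for-loop over (encrypted_message, current_drift)
def pvStepA (drift : Int) (st : List Char × Int) (c : Char) : List Char × Int :=
  if PySem.Chars.lowerChar c ∈ pvAlph then (st.1 ++ [pvEncA st.2 c], st.2 + 1)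
  else (st.1 ++ pvSubA c, drift)

def whisperer (message : String) (drift : Int) : String :=
  String.ofList ((message.toList.foldl (pvStepA drift) ([], drift)).1)

-- ===== PORT B =====
def pvAlphB : List Char := "abcdefghijklmnopqrstuvwxyz".toList

def pvSubsB : List (Char × List Char) :=
  [(',', ['^']), ('.', [';']), ('!', ['&']), ('?', ['%']), ('_', ['_']),
   ('(', ['#']), (')', ['"']), (' ', ['.']), ('\t', ['.', '.'])]

-- subs.get(ch, ch)
def pvSubB (c : Char) : List Char := (pvSubsB.lookup c).getD [c]

-- message[j].lower() in alphabet
def pvIsLetterB (c : Char) : Bool := PySem.Chars.lowerChar c ∈ pvAlphB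

-- B's inner while loop: the maximal prefix whose letter-test equals b, and the remainder
def pvSpanB (b : Bool) : List Char → List Char × List Char
  | [] => ([], [])
  | c :: cs =>
    if pvIsLetterB c = b then
      let p := pvSpanB b cs
      (c :: p.1, p.2)
    else ([], c :: cs)

theorem pvSpanB_len (b : Bool) (cs : List Char) : (pvSpanB b cs).2.length ≤ cs.length := by
  induction cs with
  | nil => simp [pvSpanB]
  | cons c cs ih =>
    simp only [pvSpanB]
    split
    · simpa using Nat.le_succ_of_le ih
    · simp

-- alphabet[(alphabet.index(ch.lower()) + drift + p) % 26], with case preserved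
def pvEncB (drift : Int) (p : Int) (ch : Char) : Char :=
  let idx : Int := (((PySem.List.index? pvAlphB (PySem.Chars.lowerChar ch)).getD 0 : Nat) : Int)
  let e : Char := PySem.List.pyGetD pvAlphB (PySem.Int.mod (idx + drift + p) 26) 'a'
  if PySem.Chars.islower ch then e else PySem.Chars.upperChar e

-- B's outer while loop over runs
def pvRunsB (drift : Int) : List Char → List Char
  | [] => []
  | c :: cs =>
    let b := pvIsLetterB c
    let pr := pvSpanB b cs
    let run := c :: pr.1
    (if b then (PySem.List.enumerate run 0).map (fun pc => pvEncB drift pc.1 pc.2)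
     else run.flatMap pvSubB) ++ pvRunsB drift pr.2
termination_by l => l.length
decreasing_by
  simp only [List.length_cons]
  have h := pvSpanB_len (pvIsLetterB c) cs
  omega

def whisperer_alt (message : String) (drift : Int) : String :=
  String.ofList (pvRunsB drift message.toList)

-- ===== PRECONDITION & SPEC =====
def Spec_whisperer (message : String) (drift : Int) (out : String) : Prop := out = whisperer_alt message drift
instance (message : String) (drift : Int) (out : String) : Decidable (Spec_whisperer message drift out) := by unfold Spec_whisperer; infer_instance

-- ===== CLAIM (what is proved, stated in full; the proofs are below) =====
def Claim_equal_whisperer : Prop := ∀ (message : String) (drift : Int), Dom_whisperer message drift → Spec_whisperer message drift (whisperer message drift)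

-- ===== LEMMAS AND PROOFS =====

theorem pvSub_eq (c : Char) : pvSubA c = pvSubB c := by
  unfold pvSubA pvSubB pvSubsB
  split_ifs with h1 h2 h3 h4 h5 h6 h7 h8 h9
  · subst h1; rfl
  · subst h2; rfl
  · subst h3; rfl
  · subst h4; rfl
  · subst h5; rfl
  · subst h6; rfl
  · subst h7; rfl
  · subst h8; rfl
  · subst h9; rfl
  · simp [List.lookup, show (c == ',') = false from beq_eq_false_iff_ne.mpr h1, show (c == '.') = false from beq_eq_false_iff_ne.mpr h2, show (c == '!') = false from beq_eq_false_iff_ne.mpr h3, show (c == '?') = false from beq_eq_false_iff_ne.mpr h4, show (c == '_') = false from beq_eq_false_iff_ne.mpr h5, show (c == '(') = false from beq_eq_false_iff_ne.mpr h6, show (c == ')') = false from beq_eq_false_iff_ne.mpr h7, show (c == ' ') = false from beq_eq_false_iff_ne.mpr h8, show (c == '\t') = false from beq_eq_false_iff_ne.mpr h9]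

theorem pvIsLetterA_iff (c : Char) :
    (PySem.Chars.lowerChar c ∈ pvAlph) ↔ pvIsLetterB c = true := by
  simp [pvIsLetterB, pvAlph, pvAlphB]

theorem pvEncA_eq_encB (d p : Int) (c : Char) : pvEncA (d + p) c = pvEncB d p c := by
  simp only [pvEncA, pvEncB, pvAlph, pvAlphB, add_assoc]

-- spanB characterisation: the input splits as prefix ++ rest, prefix all b, rest empty or head ≠ b
theorem pvSpanB_spec (b : Bool) (cs : List Char) :
    cs = (pvSpanB b cs).1 ++ (pvSpanB b cs).2 ∧
    (∀ c ∈ (pvSpanB b cs).1, pvIsLetterB c = b) ∧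
    ((pvSpanB b cs).2 = [] ∨ ∃ y ys, (pvSpanB b cs).2 = y :: ys ∧ pvIsLetterB y ≠ b) := by
  induction cs with
  | nil => simp [pvSpanB]
  | cons c cs ih =>
    simp only [pvSpanB]
    split
    · refine ⟨by simpa using ih.1, ?_, ih.2.2⟩
      intro x hx
      rcases List.mem_cons.mp hx with rfl | hx
      · exact ‹pvIsLetterB x = b›
      · exact ih.2.1 x hx
    · exact ⟨rfl, by simp, Or.inr ⟨c, cs, rfl, ‹¬ pvIsLetterB c = b›⟩⟩

-- A's fold over an all-letter run: appends the positionally-shifted letters, drift grows by the length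
theorem pvFold_alpha (d : Int) (run : List Char) :
    ∀ (a : List Char) (cur s : Int), (∀ c ∈ run, pvIsLetterB c = true) →
    run.foldl (pvStepA d) (a, cur) =
      (a ++ (PySem.List.enumerate run s).map (fun pc => pvEncA (cur + pc.1 - s) pc.2),
       cur + run.length) := by
  induction run with
  | nil => intro a cur s _; simp [PySem.List.enumerate_nil]
  | cons c run ih =>
    intro a cur s hall
    have hc : pvIsLetterB c = true := hall c (by simp)
    have hmem : PySem.Chars.lowerChar c ∈ pvAlph := (pvIsLetterA_iff c).mpr hc
    simp only [List.foldl_cons, pvStepA, if_pos hmem]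
    rw [ih (a ++ [pvEncA cur c]) (cur + 1) (s + 1) (fun x hx => hall x (by simp [hx]))]
    rw [PySem.List.enumerate_cons]
    simp only [List.map_cons, List.length_cons, Prod.mk.injEq]
    have h1 : cur + s - s = cur := by ring
    have h2 : ∀ pc : Int × Char, cur + 1 + pc.1 - (s + 1) = cur + pc.1 - s := by
      intro pc; ring
    refine ⟨?_, by push_cast; ring⟩
    rw [h1, List.map_congr_left (fun pc _ => by rw [h2 pc])]
    simp

-- A's fold over an all-non-letter run starting at the base drift: substitutions, drift stays at base
theorem pvFold_nonalpha (d : Int) (run : List Char) :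
    ∀ (a : List Char), (∀ c ∈ run, pvIsLetterB c = false) →
    run.foldl (pvStepA d) (a, d) = (a ++ run.flatMap pvSubB, d) := by
  induction run with
  | nil => intro a _; simp
  | cons c run ih =>
    intro a hall
    have hc : pvIsLetterB c = false := hall c (by simp)
    have hmem : ¬ PySem.Chars.lowerChar c ∈ pvAlph := by simp [pvIsLetterA_iff, hc]
    simp only [List.foldl_cons, pvStepA, if_neg hmem]
    rw [ih (a ++ pvSubA c) (fun x hx => hall x (by simp [hx]))]
    simp [pvSub_eq]

-- spanB on a block all equal to b followed by an empty-or-different tail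
theorem pvSpanB_block (b : Bool) (u v : List Char)
    (hu : ∀ c ∈ u, pvIsLetterB c = b)
    (hv : v = [] ∨ ∃ y ys, v = y :: ys ∧ pvIsLetterB y ≠ b) :
    pvSpanB b (u ++ v) = (u, v) := by
  induction u with
  | nil =>
    rcases hv with h | ⟨z, zs, h, hz⟩
    · simp [h, pvSpanB]
    · simp [h, pvSpanB, hz]
  | cons w u' ih =>
    have hw : pvIsLetterB w = b := hu w (by simp)
    simp only [List.cons_append, pvSpanB, if_pos hw]
    rw [ih (fun x hx => hu x (by simp [hx]))]

-- runsB over a non-letter block followed by a letter-or-empty tail splits off the block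
theorem pvRunsB_nonalpha_split (d : Int) (r2 rest2 : List Char)
    (hall : ∀ c ∈ r2, pvIsLetterB c = false)
    (hrest : rest2 = [] ∨ ∃ y ys, rest2 = y :: ys ∧ pvIsLetterB y = true) :
    pvRunsB d (r2 ++ rest2) = r2.flatMap pvSubB ++ pvRunsB d rest2 := by
  cases r2 with
  | nil => simp
  | cons y r2' =>
    have hy : pvIsLetterB y = false := hall y (by simp)
    have hspan : pvSpanB false (r2' ++ rest2) = (r2', rest2) :=
      pvSpanB_block false r2' rest2 (fun x hx => hall x (by simp [hx]))
        (by rcases hrest with h | ⟨z, zs, h, hz⟩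
            · exact Or.inl h
            · exact Or.inr ⟨z, zs, h, by simp [hz]⟩)
    rw [List.cons_append, pvRunsB.eq_def]
    simp [hy, hspan]

-- main invariant: A's fold from the base drift produces B's run decomposition
theorem pvMain (d : Int) : ∀ (n : Nat) (l a : List Char), l.length ≤ n →
    (l.foldl (pvStepA d) (a, d)).1 = a ++ pvRunsB d l := by
  intro n
  induction n with
  | zero => intro l a h; rw [List.length_eq_zero_iff.mp (Nat.le_zero.mp h)]; simp [pvRunsB]
  | succ n ih =>
    intro l a hlen
    cases l with
    | nil => simp [pvRunsB]
    | cons c cs =>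
      obtain ⟨hsplit, hrunall, hrest⟩ := pvSpanB_spec (pvIsLetterB c) cs
      set b := pvIsLetterB c with hb
      set r := (pvSpanB b cs).1 with hr
      set rest := (pvSpanB b cs).2 with hrst
      have hlist : c :: cs = (c :: r) ++ rest := by simp [hsplit]
      have hrlen : r.length + rest.length = cs.length := by
        have := congrArg List.length hsplit; simpa using this.symm
      rw [pvRunsB.eq_def]
      simp only [← hb, ← hr, ← hrst]
      cases hbv : b with
      | true =>
        have hallrun : ∀ x ∈ c :: r, pvIsLetterB x = true := by
          intro x hx
          rcases List.mem_cons.mp hx with rfl | hx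
          · rw [hb] at hbv; exact hbv
          · rw [hrunall x hx, hbv]
        rw [show (c :: cs).foldl (pvStepA d) (a, d) = rest.foldl (pvStepA d) ((c :: r).foldl (pvStepA d) (a, d)) from by
          rw [hlist, List.foldl_append]]
        rw [pvFold_alpha d (c :: r) a d 0 hallrun]
        have hmapeq :
            (PySem.List.enumerate (c :: r) 0).map (fun pc => pvEncA (d + pc.1 - 0) pc.2) =
            (PySem.List.enumerate (c :: r) 0).map (fun pc => pvEncB d pc.1 pc.2) := by
          refine List.map_congr_left (fun pc _ => ?_)
          rw [show d + pc.1 - 0 = d + pc.1 from by ring, pvEncA_eq_encB]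
        rcases hrest with h | ⟨y, ys, h, hyne⟩
        · rw [h]
          simp only [List.foldl_nil, if_pos]
          rw [hmapeq]
          simp [pvRunsB]
        · have hy : pvIsLetterB y = false := by
            rw [hbv] at hyne; simpa using hyne
          have hymem : ¬ PySem.Chars.lowerChar y ∈ pvAlph := by simp [pvIsLetterA_iff, hy]
          rw [h, List.foldl_cons]
          simp only [pvStepA, if_neg hymem]
          have hyslen : ys.length ≤ n := by
            have : rest.length = ys.length + 1 := by rw [h]; simp
            simp only [List.length_cons] at hlen
            omega
          rw [ih ys _ hyslen]
          obtain ⟨hsplit2, hall2, hrest2⟩ := pvSpanB_spec false ys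
          have hruns_ys :
              pvRunsB d ys = (pvSpanB false ys).1.flatMap pvSubB ++ pvRunsB d (pvSpanB false ys).2 := by
            rw [show ys = (pvSpanB false ys).1 ++ (pvSpanB false ys).2 from hsplit2]
            rw [pvRunsB_nonalpha_split d _ _ hall2
              (by rcases hrest2 with h2 | ⟨z, zs, h2, hz⟩
                  · exact Or.inl h2
                  · exact Or.inr ⟨z, zs, h2, by simpa using hz⟩)]
            rw [← hsplit2]
          rw [hruns_ys]
          simp only [if_pos]
          rw [hmapeq]
          have hruns_rest :
              pvRunsB d (y :: ys) = pvSubB y ++ ((pvSpanB false ys).1.flatMap pvSubB ++ pvRunsB d (pvSpanB false ys).2) := by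
            rw [pvRunsB.eq_def]
            simp [hy]
          rw [hruns_rest, pvSub_eq]
          simp

      | false =>
        have hallrun : ∀ x ∈ c :: r, pvIsLetterB x = false := by
          intro x hx
          rcases List.mem_cons.mp hx with rfl | hx
          · rw [hb] at hbv; exact hbv
          · rw [hrunall x hx, hbv]
        rw [show (c :: cs).foldl (pvStepA d) (a, d) = rest.foldl (pvStepA d) ((c :: r).foldl (pvStepA d) (a, d)) from by
          rw [hlist, List.foldl_append]]
        rw [pvFold_nonalpha d (c :: r) a hallrun]
        have hrestlen : rest.length ≤ n := by
          simp only [List.length_cons] at hlen; omega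
        rw [ih rest _ hrestlen]
        simp

-- ===== VERDICT (by name: the statement is the Claim_ definition above) =====
theorem whisperer_spec : Claim_equal_whisperer := by
  intro message drift _
  unfold Spec_whisperer whisperer whisperer_alt
  rw [pvMain drift message.toList.length message.toList [] (le_refl _)]
  simp
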